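-- pv_equiv track=rewrite | github.com/Ahsan-R-Kazmi/advent-of-code | 2021/day-19/day19.py | create_matching_points_lists
-- ===== SOURCE A (Python) =====
-- from typing import Tuple, List, Set, Dict
--
-- def create_matching_points_lists(dist_list_1: List[Tuple[int, Set[int], Tuple[int, int, int]]],
--                                  dist_list_2: List[Tuple[int, Set[int], Tuple[int, int, int]]]) \
--         -> Tuple[List[Tuple[int, int, int]], List[Tuple[int, int, int]]]:
--     scanner_a_matching_points: List[Tuple[int, int, int]] = []
--     scanner_b_matching_points: List[Tuple[int, int, int]] = []
--     for i in range(len(dist_list_1)):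
--         for j in range(len(dist_list_2)):
--             if dist_list_1[i][0] == dist_list_2[j][0] and dist_list_1[i][1] == dist_list_2[j][1]:
--                 scanner_a_matching_points.append(dist_list_1[i][2])
--                 scanner_b_matching_points.append(dist_list_2[j][2])
--
--     return scanner_a_matching_points, scanner_b_matching_points
-- ===== SOURCE B (Python) =====
-- def create_matching_points_lists(dist_list_1, dist_list_2):
--     index = {}
--     for d, s, p in dist_list_2:
--         index.setdefault((d, frozenset(s)), []).append(p)
--     a_pts, b_pts = [], []
--     for d, s, p in dist_list_1:
--         for q in index.get((d, frozenset(s)), []):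
--             a_pts.append(p)
--             b_pts.append(q)
--     return a_pts, b_pts
-- ===== Notes on version B (the rewrite author's own statement) =====
-- stated objective: faster
-- what changed: Replaced the nested scan of dist_list_2 for every element of dist_list_1 by a dict indexing dist_list_2 once under the key (distance, frozenset) mapping to the ordered list of its points, then a single pass over dist_list_1 with O(1) lookups.
import Mathlib
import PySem

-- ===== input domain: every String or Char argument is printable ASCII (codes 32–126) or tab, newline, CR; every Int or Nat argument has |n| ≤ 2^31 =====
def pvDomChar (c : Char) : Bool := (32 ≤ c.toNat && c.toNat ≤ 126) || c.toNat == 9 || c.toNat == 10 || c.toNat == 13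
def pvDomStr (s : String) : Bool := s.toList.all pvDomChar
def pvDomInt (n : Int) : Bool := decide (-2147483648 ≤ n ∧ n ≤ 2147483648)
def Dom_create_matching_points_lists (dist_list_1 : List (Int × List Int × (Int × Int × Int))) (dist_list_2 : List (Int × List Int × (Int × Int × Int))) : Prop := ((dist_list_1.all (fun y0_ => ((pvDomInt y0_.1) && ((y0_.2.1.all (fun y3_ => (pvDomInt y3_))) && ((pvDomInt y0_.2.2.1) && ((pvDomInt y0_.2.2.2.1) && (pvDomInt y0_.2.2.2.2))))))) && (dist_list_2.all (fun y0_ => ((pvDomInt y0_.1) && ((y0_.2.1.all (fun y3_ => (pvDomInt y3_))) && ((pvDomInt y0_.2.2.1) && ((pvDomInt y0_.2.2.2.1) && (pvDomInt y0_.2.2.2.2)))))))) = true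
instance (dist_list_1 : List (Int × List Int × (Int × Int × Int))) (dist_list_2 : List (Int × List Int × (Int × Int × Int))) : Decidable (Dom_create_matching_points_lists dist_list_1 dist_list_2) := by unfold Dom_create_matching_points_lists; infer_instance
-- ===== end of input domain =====

-- B replaces A's O(n*m) nested scans by a one-pass dict index of dist_list_2 keyed by
-- (distance, frozenset), then a single pass over dist_list_1 (objective: faster).

-- ===== PORT A =====
-- A: for i in range(len(l1)): for j in range(len(l2)): …  — only l1[i] / l2[j] are used,
-- so the index loops are ported as folds over the lists themselves (same elements, same order).
-- A's Python compares the second components as sets; PySem.Set.equal is that comparison.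
def create_matching_points_lists (dist_list_1 : List (Int × List Int × (Int × Int × Int))) (dist_list_2 : List (Int × List Int × (Int × Int × Int))) : (List (Int × Int × Int)) × (List (Int × Int × Int)) :=
  dist_list_1.foldl (fun acc x =>
    dist_list_2.foldl (fun acc y =>
      if x.1 == y.1 && PySem.Set.equal x.2.1 y.2.1 then
        (acc.1 ++ [x.2.2], acc.2 ++ [y.2.2])
      else acc) acc) ([], [])

-- ===== PORT B =====
-- Python's frozenset(s) used as a dict key: two frozensets are equal iff their sorted
-- element lists are equal, so the key is ported exactly as the canonical sorted list of the
-- set's distinct elements (s is a Python set, so its distinct elements are Set.ofList s).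
def pvKey (y : Int × List Int × (Int × Int × Int)) : Int × List Int :=
  (y.1, PySem.List.sorted (PySem.Set.ofList y.2.1) (fun v => v) false)

def create_matching_points_lists_alt (dist_list_1 : List (Int × List Int × (Int × Int × Int))) (dist_list_2 : List (Int × List Int × (Int × Int × Int))) : (List (Int × Int × Int)) × (List (Int × Int × Int)) :=
  let index := dist_list_2.foldl (fun d y => d.modify (pvKey y) [] (· ++ [y.2.2])) PySem.Dict.empty
  dist_list_1.foldl (fun acc x =>
    (index.getD (pvKey x) []).foldl (fun acc q => (acc.1 ++ [x.2.2], acc.2 ++ [q])) acc) ([], [])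

-- ===== PRECONDITION & SPEC =====
def Spec_create_matching_points_lists (dist_list_1 : List (Int × List Int × (Int × Int × Int))) (dist_list_2 : List (Int × List Int × (Int × Int × Int))) (out : (List (Int × Int × Int)) × (List (Int × Int × Int))) : Prop := out = create_matching_points_lists_alt dist_list_1 dist_list_2
instance (dist_list_1 : List (Int × List Int × (Int × Int × Int))) (dist_list_2 : List (Int × List Int × (Int × Int × Int))) (out : (List (Int × Int × Int)) × (List (Int × Int × Int))) : Decidable (Spec_create_matching_points_lists dist_list_1 dist_list_2 out) := by unfold Spec_create_matching_points_lists; infer_instance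

-- ===== CLAIM (what is proved, stated in full; the proofs are below) =====
def Claim_equal_create_matching_points_lists : Prop := ∀ (dist_list_1 : List (Int × List Int × (Int × Int × Int))) (dist_list_2 : List (Int × List Int × (Int × Int × Int))), Dom_create_matching_points_lists dist_list_1 dist_list_2 → Spec_create_matching_points_lists dist_list_1 dist_list_2 (create_matching_points_lists dist_list_1 dist_list_2)

-- ===== LEMMAS AND PROOFS =====

-- frozenset-key equality coincides with Python set equality
theorem pvKey_beq (x y : Int × List Int × (Int × Int × Int)) :
    (pvKey y == pvKey x) = (x.1 == y.1 && PySem.Set.equal x.2.1 y.2.1) := by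
  rw [Bool.eq_iff_iff]
  simp only [pvKey, beq_iff_eq, Bool.and_eq_true, Prod.mk.injEq,
    PySem.List.sorted_id_eq_sorted_id_iff_perm, PySem.Set.equal_iff]
  constructor
  · rintro ⟨h1, h2⟩
    refine ⟨h1.symm, fun v => ?_⟩
    have := h2.mem_iff (a := v)
    simpa [PySem.Set.mem_ofList] using this.symm
  · rintro ⟨h1, h2⟩
    refine ⟨h1.symm, ?_⟩
    refine (List.perm_ext_iff_of_nodup (PySem.Set.nodup_ofList _) (PySem.Set.nodup_ofList _)).2 ?_
    intro v
    simpa [PySem.Set.mem_ofList] using (h2 v).symm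

-- the dict built from dist_list_2 groups its points by key, in order
theorem pv_group (l2 : List (Int × List Int × (Int × Int × Int))) (k : Int × List Int) :
    (l2.foldl (fun d y => d.modify (pvKey y) [] (· ++ [y.2.2])) PySem.Dict.empty).getD k []
      = (l2.filter (fun y => pvKey y == k)).map (fun y => y.2.2) := by
  have h : l2.foldl (fun d y => d.modify (pvKey y) [] (· ++ [y.2.2])) PySem.Dict.empty
      = (l2.map (fun y => (pvKey y, y.2.2))).foldl (fun d p => d.modify p.1 [] (· ++ [p.2])) PySem.Dict.empty := by
    rw [List.foldl_map]
  rw [h, PySem.Dict.getD_foldl_modify_append]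
  simp [List.filter_map, List.map_map, Function.comp_def]

theorem pv_innerB (m : List (Int × Int × Int)) (p : Int × Int × Int) :
    ∀ acc : (List (Int × Int × Int)) × (List (Int × Int × Int)),
      m.foldl (fun acc q => (acc.1 ++ [p], acc.2 ++ [q])) acc
        = (acc.1 ++ m.map (fun _ => p), acc.2 ++ m) := by
  induction m with
  | nil => intro acc; simp
  | cons q m ih => intro acc; simp [List.foldl_cons, ih]

theorem pv_innerA (l2 : List (Int × List Int × (Int × Int × Int))) (x : Int × List Int × (Int × Int × Int)) :
    ∀ acc : (List (Int × Int × Int)) × (List (Int × Int × Int)),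
      l2.foldl (fun acc y =>
          if x.1 == y.1 && PySem.Set.equal x.2.1 y.2.1 then
            (acc.1 ++ [x.2.2], acc.2 ++ [y.2.2])
          else acc) acc
        = (acc.1 ++ (l2.filter (fun y => x.1 == y.1 && PySem.Set.equal x.2.1 y.2.1)).map (fun _ => x.2.2),
           acc.2 ++ (l2.filter (fun y => x.1 == y.1 && PySem.Set.equal x.2.1 y.2.1)).map (fun y => y.2.2)) := by
  induction l2 with
  | nil => intro acc; simp
  | cons y l2 ih =>
    intro acc
    by_cases h : (x.1 == y.1 && PySem.Set.equal x.2.1 y.2.1) = true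
    · simp [List.foldl_cons, h, ih]
    · simp [List.foldl_cons, h, ih]

-- ===== VERDICT (by name: the statement is the Claim_ definition above) =====
theorem create_matching_points_lists_spec : Claim_equal_create_matching_points_lists := by
  intro l1 l2 _
  unfold Spec_create_matching_points_lists create_matching_points_lists create_matching_points_lists_alt
  have hstep : ∀ (acc : (List (Int × Int × Int)) × (List (Int × Int × Int)))
      (x : Int × List Int × (Int × Int × Int)),
      l2.foldl (fun acc y =>
          if x.1 == y.1 && PySem.Set.equal x.2.1 y.2.1 then
            (acc.1 ++ [x.2.2], acc.2 ++ [y.2.2])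
          else acc) acc
        = ((l2.foldl (fun d y => d.modify (pvKey y) [] (· ++ [y.2.2])) PySem.Dict.empty).getD (pvKey x) []).foldl
            (fun acc q => (acc.1 ++ [x.2.2], acc.2 ++ [q])) acc := by
    intro acc x
    rw [pv_innerA, pv_innerB, pv_group]
    have hpred : (fun y => pvKey y == pvKey x)
        = (fun y : Int × List Int × (Int × Int × Int) => x.1 == y.1 && PySem.Set.equal x.2.1 y.2.1) :=
      funext (fun y => pvKey_beq x y)
    rw [hpred]
    simp [List.map_map, Function.comp_def]
  exact List.foldl_ext _ _ _ (fun acc x _ => hstep acc x)
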